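-- pv_equiv track=rewrite | github.com/GustavoBianco277/ChatBot-simples | ChatBot/ChatBot.py | RemoveLetras
-- ===== SOURCE A (Python) =====
-- cont = 0
--
-- def RemoveLetras(Interracao):
--     Pergunta = ''
--     cont = 1
--     Interracao = str(Interracao).lower()
--     for letra in Interracao:
--         try:
--             if Interracao[cont] != letra:
--                 Pergunta += letra
--             cont += 1
--         except IndexError:
--             Pergunta += letra
--             break
--     return str(Pergunta).title().strip()
-- ===== SOURCE B (Python) =====
-- def RemoveLetras(Interracao):
--     # One fused pass: collapse runs of identical characters and title-case
--     # on the fly, then strip -- instead of A's index/try-except loop followed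
--     # by separate .title() and .strip() passes.
--     out = []
--     prev = None
--     for c in str(Interracao).lower():
--         if c != prev:
--             out.append(c.upper() if c.isalpha() and (prev is None or not prev.isalpha()) else c)
--             prev = c
--     return ''.join(out).strip()
-- ===== Notes on version B (the rewrite author's own statement) =====
-- stated objective: simpler
-- what changed: Replaces A's index/try-except next-character loop followed by separate .title() and .strip() passes with a single previous-character pass that collapses runs and title-cases on the fly, then strips.
import Mathlib
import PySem

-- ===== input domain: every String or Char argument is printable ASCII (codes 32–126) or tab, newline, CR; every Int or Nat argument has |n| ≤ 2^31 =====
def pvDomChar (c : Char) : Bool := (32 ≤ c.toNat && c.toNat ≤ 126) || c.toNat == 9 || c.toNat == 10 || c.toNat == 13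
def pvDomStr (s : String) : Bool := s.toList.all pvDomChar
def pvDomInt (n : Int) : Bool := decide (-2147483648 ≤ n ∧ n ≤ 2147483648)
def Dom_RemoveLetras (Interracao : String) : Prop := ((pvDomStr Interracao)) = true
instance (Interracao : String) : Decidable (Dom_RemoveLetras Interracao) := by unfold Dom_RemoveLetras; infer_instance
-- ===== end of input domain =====

-- B fuses A's three passes (index/try-except duplicate-collapsing loop, then .title(), then .strip())
-- into one previous-character pass followed by .strip(); equal return value, objective: simpler.

-- ===== PORT A =====
-- Python str.title(), ported by hand (PySem has no title); exact on the ASCII domain: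
-- a letter following a non-letter is uppercased, a letter following a letter is lowercased.
def pyTitle : List Char → Bool → List Char
  | [], _ => []
  | c :: rest, prevCased =>
    (if PySem.Chars.isalpha c then
       (if prevCased then PySem.Chars.lowerChar c else PySem.Chars.upperChar c)
     else c) :: pyTitle rest (PySem.Chars.isalpha c)

-- A's loop: letra runs over the chars, cont is the running index (starts at 1);
-- Interracao[cont] via pyGet?: some = the compare in the try block, none = IndexError → append letra and break.
def goA (cs : List Char) : List Char → Int → List Char → List Char
  | [], _, perg => perg
  | letra :: rest, cont, perg =>
    match PySem.List.pyGet? cs cont with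
    | some ch => goA cs rest (cont + 1) (if ch ≠ letra then perg ++ [letra] else perg)
    | none => perg ++ [letra]

def RemoveLetras (Interracao : String) : String :=
  PySem.Str.strip (String.ofList (pyTitle
    (goA (PySem.Str.lower Interracao).toList (PySem.Str.lower Interracao).toList 1 []) false))

-- ===== PORT B =====
def prevIsAlpha : Option Char → Bool
  | none => false
  | some p => PySem.Chars.isalpha p

-- B's single pass: keep c when it differs from the previous kept char, uppercasing a letter
-- that starts a word (previous char missing or not a letter).
def goB : List Char → Option Char → List Char
  | [], _ => []
  | c :: rest, prev =>
    if some c = prev then goB rest prev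
    else (if PySem.Chars.isalpha c && !prevIsAlpha prev then PySem.Chars.upperChar c else c)
           :: goB rest (some c)

def RemoveLetras_alt (Interracao : String) : String :=
  PySem.Str.strip (String.ofList (goB (PySem.Str.lower Interracao).toList none))

-- ===== PRECONDITION & SPEC =====
def Spec_RemoveLetras (Interracao : String) (out : String) : Prop := out = RemoveLetras_alt Interracao
instance (Interracao : String) (out : String) : Decidable (Spec_RemoveLetras Interracao out) := by unfold Spec_RemoveLetras; infer_instance

-- ===== CLAIM (what is proved, stated in full; the proofs are below) =====
def Claim_equal_RemoveLetras : Prop := ∀ (Interracao : String), Dom_RemoveLetras Interracao → Spec_RemoveLetras Interracao (RemoveLetras Interracao)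

-- ===== LEMMAS AND PROOFS =====

-- collapse runs keeping the FIRST char of each run, given the previously kept char
def collapse : List Char → Option Char → List Char
  | [], _ => []
  | c :: rest, prev =>
    if some c = prev then collapse rest prev else c :: collapse rest (some c)

-- collapse runs keeping the LAST char of each run (what A's next-char compare computes)
def collapseLast : List Char → List Char
  | [] => []
  | [c] => [c]
  | a :: b :: rest => if b ≠ a then a :: collapseLast (b :: rest) else collapseLast (b :: rest)

theorem char_le_iff (a b : Char) : (a ≤ b) ↔ a.toNat ≤ b.toNat := by
  rw [Char.le_def, UInt32.le_iff_toNat_le]; exact Iff.rfl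

theorem isupper_lowerChar (c : Char) : PySem.Chars.isupper (PySem.Chars.lowerChar c) = false := by
  simp only [PySem.Chars.lowerChar, PySem.Chars.isupper]
  split
  · rename_i h
    simp only [Bool.and_eq_true, decide_eq_true_eq, char_le_iff] at h
    have hA : ('A').toNat = 65 := rfl
    have hZ : ('Z').toNat = 90 := rfl
    have hv : Nat.isValidChar (c.toNat + 32) := Or.inl (by omega)
    have ht : (Char.ofNat (c.toNat + 32)).toNat = c.toNat + 32 := by
      rw [Char.toNat_ofNat, if_pos hv]
    simp only [Bool.and_eq_false_iff, decide_eq_false_iff_not, char_le_iff]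
    right; omega
  · rename_i h
    simp only [Bool.and_eq_true, decide_eq_true_eq] at h
    simp only [Bool.and_eq_false_iff, decide_eq_false_iff_not]
    by_cases hA : 'A' ≤ c
    · right; intro hZ; exact h ⟨by simpa using hA, by simpa using hZ⟩
    · left; exact hA

theorem lowerChar_of_not_upper (c : Char) (h : PySem.Chars.isupper c = false) :
    PySem.Chars.lowerChar c = c := by
  simp [PySem.Chars.lowerChar, h]

-- A's loop computes keep-last collapsing: invariant over the processed prefix
theorem goA_eq (l pre perg : List Char) :
    goA (pre ++ l) l ((pre.length : Int) + 1) perg = perg ++ collapseLast l := by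
  induction l generalizing pre perg with
  | nil => simp [goA, collapseLast]
  | cons letra rest ih =>
    cases rest with
    | nil =>
      have hnone : PySem.List.pyGet? (pre ++ [letra]) ((pre.length : Int) + 1) = none := by
        rw [PySem.List.pyGet?_eq_none_iff]
        simp [PySem.Raise.InRange]
      simp [goA, hnone, collapseLast]
    | cons b rest' =>
      have hsplit : pre ++ letra :: b :: rest' = (pre ++ [letra]) ++ b :: rest' := by simp
      have hidx : ((pre.length : Int) + 1) = (((pre ++ [letra]).length : Int)) := by
        simp
      have hget : PySem.List.pyGet? (pre ++ letra :: b :: rest') ((pre.length : Int) + 1) = some b := by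
        rw [hsplit, hidx]
        exact PySem.List.pyGet?_append_length (pre ++ [letra]) rest' b
      have ih' := ih (pre ++ [letra])
      simp only [List.append_assoc, List.cons_append, List.nil_append, List.length_append,
        List.length_cons, List.length_nil] at ih'
      push_cast at ih'
      rw [goA, hget]
      show goA (pre ++ letra :: b :: rest') (b :: rest') ((pre.length : Int) + 1 + 1)
          (if b ≠ letra then perg ++ [letra] else perg) = perg ++ collapseLast (letra :: b :: rest')
      rw [ih']
      by_cases hbl : b ≠ letra <;> simp [collapseLast, hbl]

-- keep-last and keep-first collapsing agree
theorem collapseLast_cons (l : List Char) (a : Char) :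
    collapseLast (a :: l) = a :: collapse l (some a) := by
  induction l generalizing a with
  | nil => simp [collapseLast, collapse]
  | cons b rest ih =>
    by_cases hba : b = a
    · subst hba
      simp [collapseLast, collapse, ih]
    · simp [collapseLast, collapse, hba, ih]

theorem collapseLast_eq_collapse (l : List Char) : collapseLast l = collapse l none := by
  cases l with
  | nil => rfl
  | cons c rest => simp [collapseLast_cons, collapse]

-- B's fused pass = title-casing of the collapsed list, for uppercase-free input
theorem goB_eq (l : List Char) (prev : Option Char)
    (h : ∀ c ∈ l, PySem.Chars.isupper c = false) :
    goB l prev = pyTitle (collapse l prev) (prevIsAlpha prev) := by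
  induction l generalizing prev with
  | nil => rfl
  | cons c rest ih =>
    have hc : PySem.Chars.isupper c = false := h c (by simp)
    have hrest : ∀ x ∈ rest, PySem.Chars.isupper x = false := fun x hx => h x (by simp [hx])
    by_cases hp : some c = prev
    · simp only [goB, collapse, if_pos hp]
      exact ih prev hrest
    · simp only [goB, collapse, if_neg hp, pyTitle]
      rw [ih (some c) hrest]
      congr 1
      by_cases ha : PySem.Chars.isalpha c = true
      · by_cases hpc : prevIsAlpha prev = true
        · simp [ha, hpc, lowerChar_of_not_upper c hc]
        · simp only [Bool.not_eq_true] at hpc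
          simp [ha, hpc]
      · simp only [Bool.not_eq_true] at ha
        simp [ha]

theorem lower_no_upper (s : String) :
    ∀ c ∈ (PySem.Str.lower s).toList, PySem.Chars.isupper c = false := by
  intro c hc
  rw [PySem.Str.toList_lower] at hc
  simp only [PySem.Chars.lower, List.mem_map] at hc
  obtain ⟨x, _, hx⟩ := hc
  rw [← hx]
  exact isupper_lowerChar x

-- ===== VERDICT (by name: the statement is the Claim_ definition above) =====
theorem RemoveLetras_spec : Claim_equal_RemoveLetras := by
  intro Interracao _
  unfold Spec_RemoveLetras RemoveLetras RemoveLetras_alt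
  have hA := goA_eq (PySem.Str.lower Interracao).toList [] []
  simp only [List.nil_append, List.length_nil, Nat.cast_zero, zero_add] at hA
  rw [hA]
  rw [collapseLast_eq_collapse]
  rw [goB_eq _ none (lower_no_upper Interracao)]
  simp [prevIsAlpha]
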